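-- pv_equiv track=rewrite | github.com/chrishardick/advent2022 | 8/81.py | is_visible_helper
-- ===== SOURCE A (Python) =====
-- def is_visible_helper (lines, val, x, y, max_x, max_y, mode):
--
--     if x < 0 or x > max_x-1:
--         return True
--
--     if y < 0 or y > max_y-1:
--         return True
--
--     if lines[y][x] >= val:
--         return False
--
--     if mode == "x+":
--         if is_visible_helper(lines, val, x+1, y, max_x, max_y, mode):
--             return True
--     elif mode == "x-":
--         if is_visible_helper(lines, val, x-1, y, max_x, max_y, mode):
--             return True
--     if mode == "y+":
--         if is_visible_helper(lines, val, x, y+1, max_x, max_y, mode):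
--             return True
--     elif mode == "y-":
--         if is_visible_helper(lines, val, x, y-1, max_x, max_y, mode):
--             return True
--
--     return False
-- ===== SOURCE B (Python) =====
-- def is_visible_helper(lines, val, x, y, max_x, max_y, mode):
--     if x < 0 or x > max_x - 1 or y < 0 or y > max_y - 1:
--         return True
--     if mode == "x+":
--         ray = [lines[y][i] for i in range(x, max_x)]
--     elif mode == "x-":
--         ray = [lines[y][i] for i in range(x, -1, -1)]
--     elif mode == "y+":
--         ray = [lines[j][x] for j in range(y, max_y)]
--     elif mode == "y-":
--         ray = [lines[j][x] for j in range(y, -1, -1)]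
--     else:
--         return False
--     return all(h < val for h in ray)
-- ===== Notes on version B (the rewrite author's own statement) =====
-- stated objective: simpler
-- what changed: Replaces A's four-way self-recursion with a non-recursive formulation: for an in-range start, build the list of heights along the ray with a range comprehension and return all(h < val); unknown modes return False directly.
-- outside the precondition, e.g. on is_visible_helper([[9]], 5, 0, 0, 2, 1, 'x+'): A returns False, B raises IndexError
import Mathlib
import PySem

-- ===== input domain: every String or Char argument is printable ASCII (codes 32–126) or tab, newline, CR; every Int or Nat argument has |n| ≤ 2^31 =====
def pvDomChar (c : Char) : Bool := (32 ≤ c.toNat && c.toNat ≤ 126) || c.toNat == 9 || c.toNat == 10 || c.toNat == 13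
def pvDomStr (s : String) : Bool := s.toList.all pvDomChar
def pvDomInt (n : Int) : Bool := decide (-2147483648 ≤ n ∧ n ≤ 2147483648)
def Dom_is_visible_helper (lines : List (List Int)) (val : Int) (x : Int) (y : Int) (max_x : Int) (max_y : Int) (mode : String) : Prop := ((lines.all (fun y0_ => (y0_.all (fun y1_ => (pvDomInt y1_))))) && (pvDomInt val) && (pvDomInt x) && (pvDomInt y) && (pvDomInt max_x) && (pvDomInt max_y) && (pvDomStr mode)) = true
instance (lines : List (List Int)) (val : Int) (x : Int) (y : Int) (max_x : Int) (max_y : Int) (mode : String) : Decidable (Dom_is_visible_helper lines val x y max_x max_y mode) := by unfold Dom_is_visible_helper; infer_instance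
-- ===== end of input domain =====

-- B replaces A's four-way self-recursion with a non-recursive range-comprehension
-- over the ray followed by all(h < val) (objective: simpler).

-- ===== PORT A =====
-- literal transliteration of A's recursion; lines[y][x] is ported with the
-- defaulted PySem accessor (Pre_ excludes the inputs where Python would raise IndexError)
def is_visible_helper (lines : List (List Int)) (val : Int) (x : Int) (y : Int) (max_x : Int) (max_y : Int) (mode : String) : Bool :=
  if x < 0 ∨ x > max_x - 1 then true
  else if y < 0 ∨ y > max_y - 1 then true
  else if PySem.List.pyGetD (PySem.List.pyGetD lines y []) x 0 ≥ val then false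
  else if mode == "x+" then
    if is_visible_helper lines val (x+1) y max_x max_y mode then true
    else if mode == "y+" then
      if is_visible_helper lines val x (y+1) max_x max_y mode then true else false
    else if mode == "y-" then
      if is_visible_helper lines val x (y-1) max_x max_y mode then true else false
    else false
  else if mode == "x-" then
    if is_visible_helper lines val (x-1) y max_x max_y mode then true
    else if mode == "y+" then
      if is_visible_helper lines val x (y+1) max_x max_y mode then true else false
    else if mode == "y-" then
      if is_visible_helper lines val x (y-1) max_x max_y mode then true else false
    else false
  else if mode == "y+" then
    if is_visible_helper lines val x (y+1) max_x max_y mode then true else false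
  else if mode == "y-" then
    if is_visible_helper lines val x (y-1) max_x max_y mode then true else false
  else false
termination_by
  (if mode == "x+" then (max_x - x).toNat
   else if mode == "x-" then (x+1).toNat
   else if mode == "y+" then (max_y - y).toNat
   else if mode == "y-" then (y+1).toNat
   else 0)
decreasing_by all_goals simp_all

-- ===== PORT B =====
def is_visible_helper_alt (lines : List (List Int)) (val : Int) (x : Int) (y : Int) (max_x : Int) (max_y : Int) (mode : String) : Bool :=
  if x < 0 ∨ x > max_x - 1 ∨ y < 0 ∨ y > max_y - 1 then true
  else if mode == "x+" then
    ((PySem.List.pyRange x max_x 1).map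
      (fun i => PySem.List.pyGetD (PySem.List.pyGetD lines y []) i 0)).all (fun h => h < val)
  else if mode == "x-" then
    ((PySem.List.pyRange x (-1) (-1)).map
      (fun i => PySem.List.pyGetD (PySem.List.pyGetD lines y []) i 0)).all (fun h => h < val)
  else if mode == "y+" then
    ((PySem.List.pyRange y max_y 1).map
      (fun j => PySem.List.pyGetD (PySem.List.pyGetD lines j []) x 0)).all (fun h => h < val)
  else if mode == "y-" then
    ((PySem.List.pyRange y (-1) (-1)).map
      (fun j => PySem.List.pyGetD (PySem.List.pyGetD lines j []) x 0)).all (fun h => h < val)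
  else false

-- ===== PRECONDITION & SPEC =====
-- Pre_ excludes in-range starts on grids smaller than max_y rows of max_x entries:
-- there Python A's chained indexing can raise IndexError (or A may return before
-- reaching a missing cell while B's whole-ray comprehension raises).
def Pre_is_visible_helper (lines : List (List Int)) (val : Int) (x : Int) (y : Int) (max_x : Int) (max_y : Int) (mode : String) : Prop :=
  (x < 0 ∨ x > max_x - 1 ∨ y < 0 ∨ y > max_y - 1) ∨
  (max_y ≤ (lines.length : Int) ∧ ∀ row ∈ lines, max_x ≤ (row.length : Int))
instance (lines : List (List Int)) (val : Int) (x : Int) (y : Int) (max_x : Int) (max_y : Int) (mode : String) : Decidable (Pre_is_visible_helper lines val x y max_x max_y mode) := by unfold Pre_is_visible_helper; infer_instance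

def pvWitness_is_visible_helper : List (List Int) × Int × Int × Int × Int × Int × String :=
  ([[3, 1], [2, 5]], 4, 1, 0, 2, 2, "x-")

def Spec_is_visible_helper (lines : List (List Int)) (val : Int) (x : Int) (y : Int) (max_x : Int) (max_y : Int) (mode : String) (out : Bool) : Prop := out = is_visible_helper_alt lines val x y max_x max_y mode
instance (lines : List (List Int)) (val : Int) (x : Int) (y : Int) (max_x : Int) (max_y : Int) (mode : String) (out : Bool) : Decidable (Spec_is_visible_helper lines val x y max_x max_y mode out) := by unfold Spec_is_visible_helper; infer_instance

-- ===== CLAIM (what is proved, stated in full; the proofs are below) =====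
def Claim_equal_is_visible_helper : Prop := ∀ (lines : List (List Int)) (val : Int) (x : Int) (y : Int) (max_x : Int) (max_y : Int) (mode : String), Dom_is_visible_helper lines val x y max_x max_y mode → Pre_is_visible_helper lines val x y max_x max_y mode → Spec_is_visible_helper lines val x y max_x max_y mode (is_visible_helper lines val x y max_x max_y mode)

-- ===== LEMMAS AND PROOFS =====

theorem ivh_xplus (lines : List (List Int)) (val : Int) (y : Int) (max_x : Int) (max_y : Int)
    (hy0 : 0 ≤ y) (hy1 : y ≤ max_y - 1) :
    ∀ (n : Nat) (x : Int), (max_x - x).toNat ≤ n → 0 ≤ x →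
    is_visible_helper lines val x y max_x max_y "x+" =
      ((PySem.List.pyRange x max_x 1).map
        (fun i => PySem.List.pyGetD (PySem.List.pyGetD lines y []) i 0)).all (fun h => h < val) := by
  intro n
  induction n with
  | zero =>
    intro x hn hx0
    rw [is_visible_helper, if_pos (show x < 0 ∨ x > max_x - 1 from Or.inr (by omega)),
      PySem.List.pyRange_one_eq_nil (by omega)]
    simp
  | succ n ih =>
    intro x hn hx0
    by_cases hxm : max_x ≤ x
    · rw [is_visible_helper, if_pos (show x < 0 ∨ x > max_x - 1 from Or.inr (by omega)),
        PySem.List.pyRange_one_eq_nil hxm]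
      simp
    · push Not at hxm
      simp only [PySem.List.pyRange_one_cons hxm, List.map_cons, List.all_cons]
      by_cases hg : PySem.List.pyGetD (PySem.List.pyGetD lines y []) x 0 ≥ val
      · rw [is_visible_helper, if_neg (by omega), if_neg (by omega), if_pos hg,
          decide_eq_false (not_lt.mpr hg), Bool.false_and]
      · rw [decide_eq_true (lt_of_not_ge hg), Bool.true_and, ← ih (x+1) (by omega) (by omega)]
        rw [is_visible_helper, if_neg (by omega), if_neg (by omega), if_neg hg]
        simp

theorem ivh_xminus (lines : List (List Int)) (val : Int) (y : Int) (max_x : Int) (max_y : Int)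
    (hy0 : 0 ≤ y) (hy1 : y ≤ max_y - 1) :
    ∀ (n : Nat) (x : Int), (x + 1).toNat ≤ n → x ≤ max_x - 1 →
    is_visible_helper lines val x y max_x max_y "x-" =
      ((PySem.List.pyRange x (-1) (-1)).map
        (fun i => PySem.List.pyGetD (PySem.List.pyGetD lines y []) i 0)).all (fun h => h < val) := by
  intro n
  induction n with
  | zero =>
    intro x hn hx1
    rw [is_visible_helper, if_pos (show x < 0 ∨ x > max_x - 1 from Or.inl (by omega)),
      PySem.List.pyRange_neg_one_eq_nil (by omega)]
    simp
  | succ n ih =>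
    intro x hn hx1
    by_cases hneg : x < 0
    · rw [is_visible_helper, if_pos (Or.inl hneg),
        PySem.List.pyRange_neg_one_eq_nil (by omega)]
      simp
    · push Not at hneg
      simp only [PySem.List.pyRange_neg_one_cons (show (-1:Int) < x by omega),
        List.map_cons, List.all_cons]
      by_cases hg : PySem.List.pyGetD (PySem.List.pyGetD lines y []) x 0 ≥ val
      · rw [is_visible_helper, if_neg (by omega), if_neg (by omega), if_pos hg,
          decide_eq_false (not_lt.mpr hg), Bool.false_and]
      · rw [decide_eq_true (lt_of_not_ge hg), Bool.true_and, ← ih (x-1) (by omega) (by omega)]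
        rw [is_visible_helper, if_neg (by omega), if_neg (by omega), if_neg hg]
        simp

theorem ivh_yplus (lines : List (List Int)) (val : Int) (x : Int) (max_x : Int) (max_y : Int)
    (hx0 : 0 ≤ x) (hx1 : x ≤ max_x - 1) :
    ∀ (n : Nat) (y : Int), (max_y - y).toNat ≤ n → 0 ≤ y →
    is_visible_helper lines val x y max_x max_y "y+" =
      ((PySem.List.pyRange y max_y 1).map
        (fun j => PySem.List.pyGetD (PySem.List.pyGetD lines j []) x 0)).all (fun h => h < val) := by
  intro n
  induction n with
  | zero =>
    intro y hn hy0
    rw [is_visible_helper, if_neg (by omega), if_pos (show y < 0 ∨ y > max_y - 1 from Or.inr (by omega)),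
      PySem.List.pyRange_one_eq_nil (by omega)]
    simp
  | succ n ih =>
    intro y hn hy0
    by_cases hym : max_y ≤ y
    · rw [is_visible_helper, if_neg (by omega), if_pos (show y < 0 ∨ y > max_y - 1 from Or.inr (by omega)),
        PySem.List.pyRange_one_eq_nil hym]
      simp
    · push Not at hym
      simp only [PySem.List.pyRange_one_cons hym, List.map_cons, List.all_cons]
      by_cases hg : PySem.List.pyGetD (PySem.List.pyGetD lines y []) x 0 ≥ val
      · rw [is_visible_helper, if_neg (by omega), if_neg (by omega), if_pos hg,
          decide_eq_false (not_lt.mpr hg), Bool.false_and]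
      · rw [decide_eq_true (lt_of_not_ge hg), Bool.true_and, ← ih (y+1) (by omega) (by omega)]
        rw [is_visible_helper, if_neg (by omega), if_neg (by omega), if_neg hg]
        simp

theorem ivh_yminus (lines : List (List Int)) (val : Int) (x : Int) (max_x : Int) (max_y : Int)
    (hx0 : 0 ≤ x) (hx1 : x ≤ max_x - 1) :
    ∀ (n : Nat) (y : Int), (y + 1).toNat ≤ n → y ≤ max_y - 1 →
    is_visible_helper lines val x y max_x max_y "y-" =
      ((PySem.List.pyRange y (-1) (-1)).map
        (fun j => PySem.List.pyGetD (PySem.List.pyGetD lines j []) x 0)).all (fun h => h < val) := by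
  intro n
  induction n with
  | zero =>
    intro y hn hy1
    rw [is_visible_helper, if_neg (by omega), if_pos (show y < 0 ∨ y > max_y - 1 from Or.inl (by omega)),
      PySem.List.pyRange_neg_one_eq_nil (by omega)]
    simp
  | succ n ih =>
    intro y hn hy1
    by_cases hneg : y < 0
    · rw [is_visible_helper, if_neg (by omega), if_pos (Or.inl hneg),
        PySem.List.pyRange_neg_one_eq_nil (by omega)]
      simp
    · push Not at hneg
      simp only [PySem.List.pyRange_neg_one_cons (show (-1:Int) < y by omega),
        List.map_cons, List.all_cons]
      by_cases hg : PySem.List.pyGetD (PySem.List.pyGetD lines y []) x 0 ≥ val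
      · rw [is_visible_helper, if_neg (by omega), if_neg (by omega), if_pos hg,
          decide_eq_false (not_lt.mpr hg), Bool.false_and]
      · rw [decide_eq_true (lt_of_not_ge hg), Bool.true_and, ← ih (y-1) (by omega) (by omega)]
        rw [is_visible_helper, if_neg (by omega), if_neg (by omega), if_neg hg]
        simp

-- ===== VERDICT (by name: the statement is the Claim_ definition above) =====
theorem is_visible_helper_spec : Claim_equal_is_visible_helper := by
  intro lines val x y max_x max_y mode _ hpre
  unfold Spec_is_visible_helper
  by_cases hout : x < 0 ∨ x > max_x - 1 ∨ y < 0 ∨ y > max_y - 1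
  · rw [is_visible_helper_alt, if_pos hout, is_visible_helper]
    by_cases hx : x < 0 ∨ x > max_x - 1
    · rw [if_pos hx]
    · rw [if_neg hx, if_pos (show y < 0 ∨ y > max_y - 1 by omega)]
  · push Not at hout
    obtain ⟨hx0, hx1, hy0, hy1⟩ := hout
    rw [is_visible_helper_alt, if_neg (by omega)]
    by_cases h1 : mode = "x+"
    · subst h1
      rw [if_pos (by decide)]
      exact ivh_xplus lines val y max_x max_y (by omega) (by omega) (max_x - x).toNat x le_rfl (by omega)
    by_cases h2 : mode = "x-"
    · subst h2
      rw [if_neg (by decide), if_pos (by decide)]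
      exact ivh_xminus lines val y max_x max_y (by omega) (by omega) (x+1).toNat x le_rfl (by omega)
    by_cases h3 : mode = "y+"
    · subst h3
      rw [if_neg (by decide), if_neg (by decide), if_pos (by decide)]
      exact ivh_yplus lines val x max_x max_y (by omega) (by omega) (max_y - y).toNat y le_rfl (by omega)
    by_cases h4 : mode = "y-"
    · subst h4
      rw [if_neg (by decide), if_neg (by decide), if_neg (by decide), if_pos (by decide)]
      exact ivh_yminus lines val x max_x max_y (by omega) (by omega) (y+1).toNat y le_rfl (by omega)
    · have b1 : (mode == "x+") = false := beq_eq_false_iff_ne.mpr h1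
      have b2 : (mode == "x-") = false := beq_eq_false_iff_ne.mpr h2
      have b3 : (mode == "y+") = false := beq_eq_false_iff_ne.mpr h3
      have b4 : (mode == "y-") = false := beq_eq_false_iff_ne.mpr h4
      rw [is_visible_helper, if_neg (by omega), if_neg (by omega)]
      simp only [b1, b2, b3, b4]
      simp
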